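-- pv_equiv track=rewrite | github.com/latticelabs/Mitty-deprecated- | mitty/vcf2reads.py | roll_cigar
-- ===== SOURCE A (Python) =====
-- int2str = [str(n) for n in range(1001)]  # int2str[n] is faster than str(n).
--
-- def roll_cigar(pos_array, start_idx, stop_idx):
--   cigar = ''
--   counter = 0
--   cigar_fragment = None
--   for dp in pos_array[1][start_idx:stop_idx]:
--     if dp == 1:
--       if cigar_fragment != 'M':
--         if counter > 0:  # Flush
--           cigar += int2str[counter] + cigar_fragment  # '{:d}{:s}'.format(counter, cigar_fragment)
--           counter = 0
--       cigar_fragment = 'M'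
--       counter += 1
--     elif dp == 0:
--       if cigar_fragment != 'I':
--         if counter > 0:  # Flush
--           cigar += int2str[counter] + cigar_fragment  # '{:d}{:s}'.format(counter, cigar_fragment)
--           counter = 0
--       cigar_fragment = 'I'
--       counter += 1
--     elif dp > 1:
--       if cigar_fragment != 'M':
--         if counter > 0:  # Flush
--           cigar += int2str[counter] + cigar_fragment  # '{:d}{:s}'.format(counter, cigar_fragment)
--           counter = 0
--       cigar_fragment = 'M'  # We need to set this because we could be at the start of a read and type = None still
--       counter += 1
--       cigar += int2str[counter] + cigar_fragment  # '{:d}{:s}'.format(counter, cigar_fragment)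
--       cigar_fragment = 'D'
--       counter = dp - 1
--
--   # Flush all but 'D'. We only write D if we cross a D boundary
--   if cigar_fragment == 'M':
--     cigar += int2str[counter] + cigar_fragment  # '{:d}{:s}'.format(counter, cigar_fragment)
--   elif cigar_fragment == 'I':  # Ooh sophisticated - we write softclips now
--     cigar += int2str[counter] + 'S'
--
--   return cigar
-- ===== SOURCE B (Python) =====
-- int2str = [str(n) for n in range(1001)]  # same lookup table A uses (keeps its 0..1000 range)
--
-- def roll_cigar(pos_array, start_idx, stop_idx):
--   # Pass 1: expand each position difference into unit segments.
--   segs = []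
--   for dp in pos_array[1][start_idx:stop_idx]:
--     if dp == 1:
--       segs.append(('M', 1))
--     elif dp == 0:
--       segs.append(('I', 1))
--     elif dp > 1:
--       segs.append(('M', 1))
--       segs.append(('D', dp - 1))
--   # Pass 2: run-length coalesce adjacent segments with the same symbol.
--   runs = []
--   for sym, n in segs:
--     if runs and runs[-1][0] == sym:
--       runs[-1] = (sym, runs[-1][1] + n)
--     else:
--       runs.append((sym, n))
--   # Format: every run but the last verbatim; the last run is softclipped
--   # (I -> S) or dropped (D).
--   out = ''
--   for sym, n in runs[:-1]:
--     out += int2str[n] + sym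
--   if runs:
--     sym, n = runs[-1]
--     if sym == 'I':
--       out += int2str[n] + 'S'
--     elif sym != 'D':
--       out += int2str[n] + sym
--   return out
-- ===== Notes on version B (the rewrite author's own statement) =====
-- stated objective: alternative
-- what changed: A's one-pass state machine (pending fragment/counter, flush-on-change, special final flush) is replaced by a three-stage pipeline: expand each dp into unit (symbol,length) segments, run-length coalesce adjacent equal symbols, then format all runs with only the last run special-cased (I->S softclip, D dropped).
import Mathlib
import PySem

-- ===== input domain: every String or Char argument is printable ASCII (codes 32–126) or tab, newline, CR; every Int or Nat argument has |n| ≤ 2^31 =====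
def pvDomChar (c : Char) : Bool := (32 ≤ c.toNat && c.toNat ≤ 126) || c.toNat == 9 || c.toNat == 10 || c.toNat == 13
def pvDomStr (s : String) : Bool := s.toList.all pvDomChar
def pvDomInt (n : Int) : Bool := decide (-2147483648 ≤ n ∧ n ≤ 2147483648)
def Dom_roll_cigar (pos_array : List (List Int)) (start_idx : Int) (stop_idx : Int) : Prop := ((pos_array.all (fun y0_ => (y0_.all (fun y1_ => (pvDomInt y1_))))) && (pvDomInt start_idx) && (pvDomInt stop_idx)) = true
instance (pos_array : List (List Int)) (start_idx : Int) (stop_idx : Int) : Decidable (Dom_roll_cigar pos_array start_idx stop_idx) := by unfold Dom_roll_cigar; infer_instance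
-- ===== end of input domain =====

-- B replaces A's one-pass flush-on-change state machine by a three-stage pipeline
-- (unit segments, run-length coalescing, formatting); alternative decomposition, same cost.

-- shared module context: int2str = [str(n) for n in range(1001)]
def int2str : List String := (PySem.List.pyRange 0 1001 1).map PySem.Int.toStr
-- int2str[n]; under Pre_ the index is always in range, so the default is never used
def i2s (n : Int) : String := (PySem.List.pyGet? int2str n).getD ""
-- pos_array[1][start_idx:stop_idx]; under Pre_ pos_array has ≥ 2 rows, so the default is never used
def pvSlice (pos_array : List (List Int)) (start_idx stop_idx : Int) : List Int :=
  PySem.List.slice ((PySem.List.pyGet? pos_array 1).getD []) (some start_idx) (some stop_idx)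

-- ===== PORT A =====
-- the "if cigar_fragment != 'M': if counter > 0: flush" block (frag is some _ whenever counter > 0)
def flushNot (sym : String) (cig : String) (c : Int) (frag : Option String) : String × Int :=
  if frag ≠ some sym then (if c > 0 then (cig ++ i2s c ++ frag.getD "", 0) else (cig, c)) else (cig, c)

def stepA (st : String × Int × Option String) (dp : Int) : String × Int × Option String :=
  if dp = 1 then
    let p := flushNot "M" st.1 st.2.1 st.2.2
    (p.1, p.2 + 1, some "M")
  else if dp = 0 then
    let p := flushNot "I" st.1 st.2.1 st.2.2
    (p.1, p.2 + 1, some "I")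
  else if dp > 1 then
    let p := flushNot "M" st.1 st.2.1 st.2.2
    (p.1 ++ i2s (p.2 + 1) ++ "M", dp - 1, some "D")
  else st

-- final flush: all but 'D' (I is written as a softclip S)
def finishA (st : String × Int × Option String) : String :=
  if st.2.2 = some "M" then st.1 ++ i2s st.2.1 ++ "M"
  else if st.2.2 = some "I" then st.1 ++ i2s st.2.1 ++ "S"
  else st.1

def roll_cigar (pos_array : List (List Int)) (start_idx : Int) (stop_idx : Int) : String :=
  finishA ((pvSlice pos_array start_idx stop_idx).foldl stepA ("", 0, none))

-- ===== PORT B =====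
def segOf (dp : Int) : List (String × Int) :=
  if dp = 1 then [("M", 1)]
  else if dp = 0 then [("I", 1)]
  else if dp > 1 then [("M", 1), ("D", dp - 1)]
  else []

-- Source B keeps `runs` and updates runs[-1]; the port keeps the list reversed (head = last)
def stepRun (runs : List (String × Int)) (p : String × Int) : List (String × Int) :=
  match runs with
  | (s, c) :: rest => if s = p.1 then (s, c + p.2) :: rest else p :: (s, c) :: rest
  | [] => [p]

def fmtStep (o : String) (p : String × Int) : String := o ++ i2s p.2 ++ p.1

-- the formatting loop over runs[:-1] plus the special-cased last run
def fmtB (runs : List (String × Int)) : String :=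
  let out := runs.dropLast.foldl fmtStep ""
  match runs.getLast? with
  | some (s, n) => if s = "I" then out ++ i2s n ++ "S" else if s = "D" then out else out ++ i2s n ++ s
  | none => out

def roll_cigar_alt (pos_array : List (List Int)) (start_idx : Int) (stop_idx : Int) : String :=
  fmtB (((((pvSlice pos_array start_idx stop_idx).flatMap segOf)).foldl stepRun []).reverse)

-- ===== PRECONDITION & SPEC =====
-- the slice with the dps A silently skips (dp < 0) removed: only these elements affect A's state
def pvKept (pos_array : List (List Int)) (start_idx stop_idx : Int) : List Int :=
  (pvSlice pos_array start_idx stop_idx).filter (fun dp => decide (0 ≤ dp))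

-- isRun l v i j: positions i..j of l are a MAXIMAL block of consecutive elements equal to v
def isRun (l : List Int) (v : Int) (i j : Nat) : Bool :=
  (List.range' i (j + 1 - i)).all (fun k => l.getD k 0 == v) &&
  (i == 0 || !(l.getD (i - 1) 0 == v)) && (j + 1 == l.length || !(l.getD (j + 1) 0 == v))

-- Pre_ excludes exactly the inputs on which A raises: pos_array with fewer than 2 rows
-- (IndexError on pos_array[1]), or an input whose int2str lookups overflow the 0..1000 table
-- (IndexError): a dp > 1001 anywhere but the last kept position (its deletion run dp-1 is
-- flushed), a maximal run of 1s whose length (plus 1 if a dp > 1 follows it) exceeds 1000,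
-- or a maximal run of 0s longer than 1000.
def Pre_roll_cigar (pos_array : List (List Int)) (start_idx : Int) (stop_idx : Int) : Prop :=
  2 ≤ pos_array.length ∧
  (∀ i < (pvKept pos_array start_idx stop_idx).length, 1 < (pvKept pos_array start_idx stop_idx).getD i 0 → i + 1 < (pvKept pos_array start_idx stop_idx).length → (pvKept pos_array start_idx stop_idx).getD i 0 - 1 ≤ 1000) ∧
  (∀ i < (pvKept pos_array start_idx stop_idx).length, ∀ j < (pvKept pos_array start_idx stop_idx).length, i ≤ j → isRun (pvKept pos_array start_idx stop_idx) 1 i j = true →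
     j - i + 1 + (if j + 1 < (pvKept pos_array start_idx stop_idx).length ∧ 1 < (pvKept pos_array start_idx stop_idx).getD (j + 1) 0 then 1 else 0) ≤ 1000) ∧
  (∀ i < (pvKept pos_array start_idx stop_idx).length, ∀ j < (pvKept pos_array start_idx stop_idx).length, i ≤ j → isRun (pvKept pos_array start_idx stop_idx) 0 i j = true → j - i + 1 ≤ 1000)
instance (pos_array : List (List Int)) (start_idx : Int) (stop_idx : Int) : Decidable (Pre_roll_cigar pos_array start_idx stop_idx) := by unfold Pre_roll_cigar; infer_instance

def pvWitness_roll_cigar : List (List Int) × Int × Int := ([[0, 0, 0, 0, 0], [1, 1, 0, 3, 1]], 0, 5)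

def Spec_roll_cigar (pos_array : List (List Int)) (start_idx : Int) (stop_idx : Int) (out : String) : Prop := out = roll_cigar_alt pos_array start_idx stop_idx
instance (pos_array : List (List Int)) (start_idx : Int) (stop_idx : Int) (out : String) : Decidable (Spec_roll_cigar pos_array start_idx stop_idx out) := by unfold Spec_roll_cigar; infer_instance

-- ===== CLAIM (what is proved, stated in full; the proofs are below) =====
def Claim_equal_roll_cigar : Prop := ∀ (pos_array : List (List Int)) (start_idx : Int) (stop_idx : Int), Dom_roll_cigar pos_array start_idx stop_idx → Pre_roll_cigar pos_array start_idx stop_idx → Spec_roll_cigar pos_array start_idx stop_idx (roll_cigar pos_array start_idx stop_idx)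

-- ===== LEMMAS AND PROOFS =====

-- proof-side recursive run-length coalescing (Source B's runs loop computes exactly this)
def coal : List (String × Int) → List (String × Int)
  | [] => []
  | [p] => [p]
  | (s1, c1) :: (s2, c2) :: t =>
    if s1 = s2 then coal ((s1, c1 + c2) :: t) else (s1, c1) :: coal ((s2, c2) :: t)
termination_by l => l.length

-- proof-side recursive formatter (fmtB computes exactly this)
def fmt : List (String × Int) → String
  | [] => ""
  | [(s, c)] => if s = "I" then i2s c ++ "S" else if s = "D" then "" else i2s c ++ s
  | (s, c) :: q :: t => i2s c ++ s ++ fmt (q :: t)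

-- fmt emits every non-final run verbatim
lemma fmt_cons (s : String) (c : Int) (q : String × Int) (t : List (String × Int)) :
    fmt ((s, c) :: q :: t) = i2s c ++ s ++ fmt (q :: t) := rfl

lemma segOf_one : segOf 1 = [("M", 1)] := by decide
lemma segOf_zero : segOf 0 = [("I", 1)] := by decide

lemma coal_ne_nil (l : List (String × Int)) (h : l ≠ []) : coal l ≠ [] := by
  induction l using coal.induct with
  | case1 => exact absurd rfl h
  | case2 p => simp [coal]
  | case3 c1 s2 c2 t ih => rw [coal, if_pos rfl]; exact ih (by simp)
  | case4 s1 c1 s2 c2 t hne ih => rw [coal]; simp only [if_neg hne]; simp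

lemma coal_cons_merge (s : String) (c c2 : Int) (S : List (String × Int)) :
    coal ((s, c) :: (s, c2) :: S) = coal ((s, c + c2) :: S) := by
  rw [coal]; simp

lemma fmt_coal_cons_ne (s : String) (c : Int) (s2 : String) (c2 : Int) (S : List (String × Int))
    (h : s ≠ s2) : fmt (coal ((s, c) :: (s2, c2) :: S)) = i2s c ++ s ++ fmt (coal ((s2, c2) :: S)) := by
  rw [coal]; simp only [if_neg h]
  obtain ⟨q, t, hq⟩ := List.exists_cons_of_ne_nil (coal_ne_nil ((s2, c2) :: S) (by simp))
  rw [hq, fmt_cons]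

-- the main loop invariant: A's running state (cigar, counter, fragment) plus the remaining
-- input, flushed at the end, equals the already-written cigar followed by B's
-- coalesce-then-format of the pending run and the remaining unit segments
lemma loopA (l : List Int) : ∀ (cig : String) (c : Int) (f : Option String),
    (c = 0 ∧ f = none) ∨ (1 ≤ c ∧ (f = some "M" ∨ f = some "I" ∨ f = some "D")) →
    finishA (l.foldl stepA (cig, c, f)) =
      cig ++ fmt (coal ((match f with | none => [] | some s => [(s, c)]) ++ l.flatMap segOf)) := by
  induction l with
  | nil =>
    intro cig c f h
    rcases h with ⟨rfl, rfl⟩ | ⟨hc, rfl | rfl | rfl⟩ <;>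
      simp [finishA, coal, fmt, String.append_assoc, String.append_empty]
  | cons dp rest ih =>
    intro cig c f h
    simp only [List.flatMap_cons, List.foldl_cons]
    by_cases h1 : dp = 1
    · subst h1
      rcases h with ⟨rfl, rfl⟩ | ⟨hc, rfl | rfl | rfl⟩
      · rw [show stepA (cig, 0, none) 1 = (cig, 1, some "M") from by simp [stepA, flushNot],
          ih cig 1 (some "M") (Or.inr ⟨le_refl 1, Or.inl rfl⟩)]
        simp [segOf_one]
      · rw [show stepA (cig, c, some "M") 1 = (cig, c + 1, some "M") from by simp [stepA, flushNot],
          ih cig (c + 1) (some "M") (Or.inr ⟨by omega, Or.inl rfl⟩)]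
        simp only [segOf_one, List.cons_append, List.nil_append]
        rw [coal_cons_merge]
      · rw [show stepA (cig, c, some "I") 1 = (cig ++ i2s c ++ "I", 1, some "M") from by
            simp [stepA, flushNot, show (0:Int) < c by omega],
          ih _ 1 (some "M") (Or.inr ⟨le_refl 1, Or.inl rfl⟩)]
        simp only [segOf_one, List.cons_append, List.nil_append]
        rw [fmt_coal_cons_ne "I" c "M" 1 _ (by decide)]
        simp [String.append_assoc]
      · rw [show stepA (cig, c, some "D") 1 = (cig ++ i2s c ++ "D", 1, some "M") from by
            simp [stepA, flushNot, show (0:Int) < c by omega],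
          ih _ 1 (some "M") (Or.inr ⟨le_refl 1, Or.inl rfl⟩)]
        simp only [segOf_one, List.cons_append, List.nil_append]
        rw [fmt_coal_cons_ne "D" c "M" 1 _ (by decide)]
        simp [String.append_assoc]
    · by_cases h0 : dp = 0
      · subst h0
        rcases h with ⟨rfl, rfl⟩ | ⟨hc, rfl | rfl | rfl⟩
        · rw [show stepA (cig, 0, none) 0 = (cig, 1, some "I") from by simp [stepA, flushNot],
            ih cig 1 (some "I") (Or.inr ⟨le_refl 1, Or.inr (Or.inl rfl)⟩)]
          simp [segOf_zero]
        · rw [show stepA (cig, c, some "M") 0 = (cig ++ i2s c ++ "M", 1, some "I") from by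
              simp [stepA, flushNot, show (0:Int) < c by omega],
            ih _ 1 (some "I") (Or.inr ⟨le_refl 1, Or.inr (Or.inl rfl)⟩)]
          simp only [segOf_zero, List.cons_append, List.nil_append]
          rw [fmt_coal_cons_ne "M" c "I" 1 _ (by decide)]
          simp [String.append_assoc]
        · rw [show stepA (cig, c, some "I") 0 = (cig, c + 1, some "I") from by simp [stepA, flushNot],
            ih cig (c + 1) (some "I") (Or.inr ⟨by omega, Or.inr (Or.inl rfl)⟩)]
          simp only [segOf_zero, List.cons_append, List.nil_append]
          rw [coal_cons_merge]
        · rw [show stepA (cig, c, some "D") 0 = (cig ++ i2s c ++ "D", 1, some "I") from by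
              simp [stepA, flushNot, show (0:Int) < c by omega],
            ih _ 1 (some "I") (Or.inr ⟨le_refl 1, Or.inr (Or.inl rfl)⟩)]
          simp only [segOf_zero, List.cons_append, List.nil_append]
          rw [fmt_coal_cons_ne "D" c "I" 1 _ (by decide)]
          simp [String.append_assoc]
      · by_cases hg : dp > 1
        · have hseg : segOf dp = [("M", 1), ("D", dp - 1)] := by simp [segOf, h1, h0, hg]
          rcases h with ⟨rfl, rfl⟩ | ⟨hc, rfl | rfl | rfl⟩
          · rw [show stepA (cig, 0, none) dp = (cig ++ i2s 1 ++ "M", dp - 1, some "D") from by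
                simp [stepA, flushNot, h1, h0, hg],
              ih _ (dp - 1) (some "D") (Or.inr ⟨by omega, Or.inr (Or.inr rfl)⟩)]
            simp only [hseg, List.cons_append, List.nil_append]
            rw [fmt_coal_cons_ne "M" 1 "D" (dp - 1) _ (by decide)]
            simp [String.append_assoc]
          · rw [show stepA (cig, c, some "M") dp = (cig ++ i2s (c + 1) ++ "M", dp - 1, some "D") from by
                simp [stepA, flushNot, h1, h0, hg],
              ih _ (dp - 1) (some "D") (Or.inr ⟨by omega, Or.inr (Or.inr rfl)⟩)]
            simp only [hseg, List.cons_append, List.nil_append]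
            rw [coal_cons_merge, fmt_coal_cons_ne "M" (c + 1) "D" (dp - 1) _ (by decide)]
            simp [String.append_assoc]
          · rw [show stepA (cig, c, some "I") dp
                  = (cig ++ i2s c ++ "I" ++ i2s 1 ++ "M", dp - 1, some "D") from by
                simp [stepA, flushNot, h1, h0, hg, show (0:Int) < c by omega],
              ih _ (dp - 1) (some "D") (Or.inr ⟨by omega, Or.inr (Or.inr rfl)⟩)]
            simp only [hseg, List.cons_append, List.nil_append]
            rw [fmt_coal_cons_ne "I" c "M" 1 _ (by decide),
              fmt_coal_cons_ne "M" 1 "D" (dp - 1) _ (by decide)]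
            simp [String.append_assoc]
          · rw [show stepA (cig, c, some "D") dp
                  = (cig ++ i2s c ++ "D" ++ i2s 1 ++ "M", dp - 1, some "D") from by
                simp [stepA, flushNot, h1, h0, hg, show (0:Int) < c by omega],
              ih _ (dp - 1) (some "D") (Or.inr ⟨by omega, Or.inr (Or.inr rfl)⟩)]
            simp only [hseg, List.cons_append, List.nil_append]
            rw [fmt_coal_cons_ne "D" c "M" 1 _ (by decide),
              fmt_coal_cons_ne "M" 1 "D" (dp - 1) _ (by decide)]
            simp [String.append_assoc]
        · have hseg : segOf dp = [] := by simp [segOf, h1, h0, hg]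
          rw [show stepA (cig, c, f) dp = (cig, c, f) from by simp [stepA, h1, h0, hg], ih cig c f h]
          simp [hseg]

-- Source B's runs loop (reversed accumulator) computes coal
lemma stepRun_ne_nil (runs : List (String × Int)) (p : String × Int) : stepRun runs p ≠ [] := by
  cases runs with
  | nil => simp [stepRun]
  | cons q r => obtain ⟨s, c⟩ := q; simp only [stepRun]; split <;> simp

lemma stepRun_append (b acc : List (String × Int)) (p : String × Int) (h : b ≠ []) :
    stepRun (b ++ acc) p = stepRun b p ++ acc := by
  cases b with
  | nil => exact absurd rfl h
  | cons q r => obtain ⟨s, c⟩ := q; simp only [List.cons_append, stepRun]; split <;> simp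

lemma foldl_stepRun_append (l : List (String × Int)) : ∀ (b acc : List (String × Int)), b ≠ [] →
    List.foldl stepRun (b ++ acc) l = List.foldl stepRun b l ++ acc := by
  induction l with
  | nil => intro b acc _; simp
  | cons p t ih =>
    intro b acc hb
    simp only [List.foldl_cons, stepRun_append b acc p hb]
    exact ih _ acc (stepRun_ne_nil b p)

lemma runs_eq_coal (l : List (String × Int)) : (List.foldl stepRun [] l).reverse = coal l := by
  induction l using coal.induct with
  | case1 => simp [coal]
  | case2 p => simp [coal, stepRun]
  | case3 c1 s2 c2 t ih =>
    rw [coal, if_pos rfl, ← ih]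
    simp [stepRun]
  | case4 s1 c1 s2 c2 t hne ih =>
    rw [coal]; simp only [if_neg hne]
    rw [← ih]
    have h2 : stepRun [(s1, c1)] (s2, c2) = [(s2, c2)] ++ [(s1, c1)] := by
      simp [stepRun, hne]
    simp only [List.foldl_cons, show stepRun [] (s1, c1) = [(s1, c1)] from rfl,
      show stepRun [] (s2, c2) = [(s2, c2)] from rfl, h2,
      foldl_stepRun_append t [(s2, c2)] [(s1, c1)] (by simp)]
    simp

-- Source B's formatting loop computes fmt
lemma foldl_fmtStep_init (l : List (String × Int)) : ∀ (init : String),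
    List.foldl fmtStep init l = init ++ List.foldl fmtStep "" l := by
  induction l with
  | nil => intro init; simp [String.append_empty]
  | cons p t ih =>
    intro init
    simp only [List.foldl_cons]
    rw [ih (fmtStep init p), ih (fmtStep "" p)]
    simp [fmtStep, String.append_assoc, String.empty_append]

lemma fmtB_cons_cons (p q : String × Int) (t : List (String × Int)) :
    fmtB (p :: q :: t) = (i2s p.2 ++ p.1) ++ fmtB (q :: t) := by
  obtain ⟨s, c⟩ := p
  simp only [fmtB, List.dropLast_cons₂, List.foldl_cons, List.getLast?_cons_cons]
  rw [foldl_fmtStep_init]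
  rcases hgl : (q :: t).getLast? with _ | ⟨s', n'⟩ <;>
    simp only [fmtStep, String.empty_append] <;>
    (try split_ifs) <;> simp [String.append_assoc]

lemma fmtB_eq_fmt : ∀ (runs : List (String × Int)), fmtB runs = fmt runs
  | [] => by simp [fmtB, fmt]
  | [(s, c)] => by
    simp only [fmtB, fmt, List.dropLast, List.foldl_nil, List.getLast?_singleton]
    split_ifs <;> simp [String.empty_append]
  | (s, c) :: q :: t => by
    rw [fmtB_cons_cons, fmtB_eq_fmt (q :: t), fmt_cons]

-- ===== VERDICT (by name: the statement is the Claim_ definition above) =====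
theorem roll_cigar_spec : Claim_equal_roll_cigar := by
  intro pos_array start_idx stop_idx _hdom _hpre
  unfold Spec_roll_cigar roll_cigar roll_cigar_alt
  rw [loopA (pvSlice pos_array start_idx stop_idx) "" 0 none (Or.inl ⟨rfl, rfl⟩),
    runs_eq_coal, fmtB_eq_fmt]
  simp [String.empty_append]
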